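-- pv_equiv track=rewrite | github.com/HHoofs/husky | file_handling/read_db.py | ids_for_each_count
-- ===== SOURCE A (Python) =====
-- def ids_for_each_count(img_encoding):
--     ids_per_count = {}
--     ids_for_empty = {}
--     for sample, features in img_encoding.items():
--         count = features['count']
--         if count == 0:
--             if not ids_for_empty.get(count):
--                 ids_for_empty[count] = []
--             ids_for_empty[count].append(sample)
--         else:
--             if not ids_per_count.get(count):
--                 ids_per_count[count] = []
--             ids_per_count[count].append(sample)
--
--     return ids_for_empty, ids_per_count
-- ===== SOURCE B (Python) =====
-- def ids_for_each_count(img_encoding):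
--     items = list(img_encoding.items())
--     counts = list(dict.fromkeys(features['count'] for _, features in items))
--     def group(c):
--         return [sample for sample, features in items if features['count'] == c]
--     ids_for_empty = {c: group(c) for c in counts if c == 0}
--     ids_per_count = {c: group(c) for c in counts if c != 0}
--     return ids_for_empty, ids_per_count
-- ===== Notes on version B (the rewrite author's own statement) =====
-- stated objective: alternative
-- what changed: A accumulates two dicts in one pass with a count==0 branch and mutation; B first computes the list of distinct counts (dict.fromkeys) and then builds each group by an independent filtering scan of the items per distinct count, splitting zero from nonzero counts by comprehensions - grouping by repeated selection instead of incremental dict accumulation (O(n*k) instead of O(n)).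
import Mathlib
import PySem

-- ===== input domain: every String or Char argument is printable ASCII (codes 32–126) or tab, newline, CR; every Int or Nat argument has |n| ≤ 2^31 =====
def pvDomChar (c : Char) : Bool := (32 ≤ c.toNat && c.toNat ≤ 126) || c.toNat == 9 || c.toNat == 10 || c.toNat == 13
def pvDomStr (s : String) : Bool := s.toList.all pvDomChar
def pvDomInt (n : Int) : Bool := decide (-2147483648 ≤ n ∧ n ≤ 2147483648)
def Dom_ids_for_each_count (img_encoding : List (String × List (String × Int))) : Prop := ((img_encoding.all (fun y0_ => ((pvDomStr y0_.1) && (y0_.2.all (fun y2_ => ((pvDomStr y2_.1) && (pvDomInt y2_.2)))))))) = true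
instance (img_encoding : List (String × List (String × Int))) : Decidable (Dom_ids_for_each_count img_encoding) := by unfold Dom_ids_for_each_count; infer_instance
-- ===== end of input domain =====

-- B replaces A's one-pass two-dict accumulation with dedup of the counts followed by one filtering
-- scan per distinct count (grouping by repeated selection); objective: alternative algorithm, not faster.


-- ===== PORT A =====
-- loop body of A: state = (ids_per_count, ids_for_empty)
def aStep (st : PySem.Dict Int (List String) × PySem.Dict Int (List String))
    (p : String × List (String × Int)) :
    PySem.Dict Int (List String) × PySem.Dict Int (List String) :=
  let count := (PySem.Dict.mk p.2).getD "count" 0   -- features['count'] (KeyError excluded by Pre_)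
  if count = 0 then
    let emp := if ((st.2).get? count).getD [] = [] then (st.2).insert count [] else st.2
    (st.1, emp.modify count [] (fun v => v ++ [p.1]))
  else
    let per := if ((st.1).get? count).getD [] = [] then (st.1).insert count [] else st.1
    (per.modify count [] (fun v => v ++ [p.1]), st.2)

def ids_for_each_count (img_encoding : List (String × List (String × Int))) : (List (Int × List String)) × (List (Int × List String)) :=
  let st := img_encoding.foldl aStep (PySem.Dict.empty, PySem.Dict.empty)
  ((st.2).items, (st.1).items)

-- ===== PORT B =====
-- features['count'] of one item
def bKey (p : String × List (String × Int)) : Int := (PySem.Dict.mk p.2).getD "count" 0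
-- B's 'group(c)': the samples whose count equals c, one filtering scan
def bGroup (img_encoding : List (String × List (String × Int))) (c : Int) : List String :=
  (img_encoding.filter (fun p => bKey p == c)).map Prod.fst

def ids_for_each_count_alt (img_encoding : List (String × List (String × Int))) : (List (Int × List String)) × (List (Int × List String)) :=
  let counts := PySem.List.dedup (img_encoding.map bKey)   -- list(dict.fromkeys(...))
  ((counts.filter (fun c => c == 0)).map (fun c => (c, bGroup img_encoding c)),
   (counts.filter (fun c => !(c == 0))).map (fun c => (c, bGroup img_encoding c)))

-- ===== PRECONDITION & SPEC =====
-- Pre_ requires the association lists to be valid encodings of Python dicts (unique keys, which every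
-- real dict input satisfies) and every features dict to contain the key "count" (A raises KeyError otherwise).
def Pre_ids_for_each_count (img_encoding : List (String × List (String × Int))) : Prop :=
  (img_encoding.map Prod.fst).Nodup ∧
  ∀ p ∈ img_encoding, (p.2.map Prod.fst).Nodup ∧ "count" ∈ p.2.map Prod.fst
instance (img_encoding : List (String × List (String × Int))) : Decidable (Pre_ids_for_each_count img_encoding) := by unfold Pre_ids_for_each_count; infer_instance

def pvWitness_ids_for_each_count : (List (String × List (String × Int))) :=
  [("a", [("count", 0)]), ("b", [("count", 2)]), ("c", [("count", 2)])]

def Spec_ids_for_each_count (img_encoding : List (String × List (String × Int))) (out : (List (Int × List String)) × (List (Int × List String))) : Prop := out = ids_for_each_count_alt img_encoding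
instance (img_encoding : List (String × List (String × Int))) (out : (List (Int × List String)) × (List (Int × List String))) : Decidable (Spec_ids_for_each_count img_encoding out) := by unfold Spec_ids_for_each_count; infer_instance

-- ===== CLAIM (what is proved, stated in full; the proofs are below) =====
def Claim_equal_ids_for_each_count : Prop := ∀ (img_encoding : List (String × List (String × Int))), Dom_ids_for_each_count img_encoding → Pre_ids_for_each_count img_encoding → Spec_ids_for_each_count img_encoding (ids_for_each_count img_encoding)

-- ===== LEMMAS AND PROOFS =====

-- proof-side helper: the single-dict grouping loop both programs are equivalent to
def bStep (d : PySem.Dict Int (List String)) (p : String × List (String × Int)) :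
    PySem.Dict Int (List String) :=
  (d.setdefault (bKey p) []).modify (bKey p) [] (fun v => v ++ [p.1])

theorem map_upd_id (items : List (Int × List String)) (c : Int) (x : Int × List String)
    (h : ∀ q ∈ items, q.1 ≠ c) :
    items.map (fun q => if q.1 = c then x else q) = items := by
  induction items with
  | nil => rfl
  | cons a t ih =>
      rw [List.map_cons, if_neg (h a (by simp)), ih (fun q hq => h q (by simp [hq]))]

theorem find?_map_upd (items : List (Int × List String)) (c : Int) (v : List String)
    (h : c ∈ items.map Prod.fst) :
    (items.map (fun q => if q.1 = c then (c, v) else q)).find? (fun q => q.1 == c) = some (c, v) := by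
  induction items with
  | nil => simp at h
  | cons a t ih =>
      by_cases hc : a.1 = c
      · simp [hc]
      · rw [List.map_cons, if_neg hc, List.find?_cons_of_neg (by simp [hc])]
        exact ih (by simpa [Ne.symm hc] using h)

theorem any_map_upd (items : List (Int × List String)) (c : Int) (v : List String) :
    (items.map (fun q => if q.1 = c then (c, v) else q)).any (fun q => q.1 == c)
      = items.any (fun q => q.1 == c) := by
  induction items with
  | nil => rfl
  | cons a t ih =>
      by_cases hc : a.1 = c <;> simp [hc, ih]

theorem astep_eq_modify (d : PySem.Dict Int (List String)) (c : Int)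
    (f : List String → List String) :
    (if (d.get? c).getD [] = [] then d.insert c [] else d).modify c [] f
      = d.modify c [] f := by
  cases d with
  | mk items =>
    cases hfind : items.find? (fun q => q.1 == c) with
    | none =>
        have hany : items.any (fun q => q.1 == c) = false := by
          rw [List.any_eq_false]; exact List.find?_eq_none.mp hfind
        have hne : ∀ q ∈ items, q.1 ≠ c := by
          intro q hq; have := (List.any_eq_false.mp hany) q hq; simpa using this
        rw [if_pos (by simp [PySem.Dict.get?, hfind])]
        simp only [PySem.Dict.modify, PySem.Dict.insert, PySem.Dict.contains,
          PySem.Dict.getD, PySem.Dict.get?, hany, hfind, Bool.false_eq_true, if_false,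
          List.any_append, List.find?_append]
        simp [beq_iff_eq, List.map_append, map_upd_id items c _ hne]
    | some q =>
        have hq1 : q.1 = c := by simpa using List.find?_some hfind
        have hmem : c ∈ items.map Prod.fst := by
          rw [← hq1]; exact List.mem_map_of_mem (List.mem_of_find?_eq_some hfind)
        have hany : items.any (fun q => q.1 == c) = true := by
          have hpq := List.find?_some hfind
          rw [List.any_eq_true]
          exact ⟨q, List.mem_of_find?_eq_some hfind, hpq⟩
        by_cases hv : q.2 = ([] : List String)
        · rw [if_pos (by simp [PySem.Dict.get?, hfind, hv])]
          simp only [PySem.Dict.modify, PySem.Dict.insert, PySem.Dict.contains,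
            PySem.Dict.getD, PySem.Dict.get?, hany, hfind, if_true]
          simp only [beq_iff_eq]
          rw [any_map_upd items c ([] : List String), hany, if_pos rfl,
            find?_map_upd items c ([] : List String) hmem]
          simp only [Option.map_some, Option.getD_some, List.map_map, hv]
          congr 1
          apply List.map_congr_left
          intro r hr
          by_cases hrc : r.1 = c <;> simp [Function.comp, hrc]
        · rw [if_neg (by simp [PySem.Dict.get?, hfind, hv])]

theorem setdefault_modify (d : PySem.Dict Int (List String)) (c : Int)
    (f : List String → List String) :
    (d.setdefault c []).modify c [] f = d.modify c [] f := by
  cases d with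
  | mk items =>
    cases hany : items.any (fun q => q.1 == c) with
    | true => simp [PySem.Dict.setdefault, PySem.Dict.contains, hany]
    | false =>
      have hfind : items.find? (fun q => q.1 == c) = none := by
        rw [List.find?_eq_none]; exact fun q hq => (List.any_eq_false.mp hany) q hq
      have hne : ∀ q ∈ items, q.1 ≠ c := by
        intro q hq; have := (List.any_eq_false.mp hany) q hq; simpa using this
      simp only [PySem.Dict.setdefault, PySem.Dict.contains, hany,
        Bool.false_eq_true, if_false, PySem.Dict.modify, PySem.Dict.insert,
        PySem.Dict.getD, PySem.Dict.get?, List.any_append, List.find?_append, hfind]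
      simp [beq_iff_eq, List.map_append, map_upd_id items c _ hne]

theorem find?_filter_key (items : List (Int × List String)) (c : Int) (p : Int → Bool)
    (hp : p c = true) :
    (items.filter (fun q => p q.1)).find? (fun q => q.1 == c) = items.find? (fun q => q.1 == c) := by
  induction items with
  | nil => rfl
  | cons a t ih =>
      by_cases hc : a.1 = c
      · rw [List.filter_cons, if_pos (by simp [hc, hp])]
        rw [List.find?_cons_of_pos (by simp [hc]), List.find?_cons_of_pos (by simp [hc])]
      · rw [List.find?_cons_of_neg (by simp [hc]), ← ih, List.filter_cons]
        by_cases hpa : p a.1 = true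
        · rw [if_pos (by simpa using hpa), List.find?_cons_of_neg (by simp [hc])]
        · rw [if_neg (by simpa using hpa)]

theorem any_filter_key (items : List (Int × List String)) (c : Int) (p : Int → Bool)
    (hp : p c = true) :
    (items.filter (fun q => p q.1)).any (fun q => q.1 == c) = items.any (fun q => q.1 == c) := by
  induction items with
  | nil => rfl
  | cons a t ih =>
      by_cases hc : a.1 = c
      · rw [List.filter_cons, if_pos (by simp [hc, hp])]; simp [hc]
      · rw [List.filter_cons]
        by_cases hpa : p a.1 = true
        · rw [if_pos (by simpa using hpa)]; simp [ih]
        · rw [if_neg (by simpa using hpa), ih]; simp [hc]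

theorem filter_map_upd (items : List (Int × List String)) (c : Int) (v : List String)
    (p : Int → Bool) (hp : p c = true) :
    (items.map (fun q => if q.1 = c then (c, v) else q)).filter (fun q => p q.1)
      = (items.filter (fun q => p q.1)).map (fun q => if q.1 = c then (c, v) else q) := by
  induction items with
  | nil => rfl
  | cons a t ih =>
      by_cases hc : a.1 = c
      · simp only [List.map_cons, if_pos hc, List.filter_cons]
        rw [if_pos (by simpa using hp), if_pos (by simp [hc, hp])]
        simp [hc, ih]
      · simp only [List.map_cons, if_neg hc, List.filter_cons]
        by_cases hpa : p a.1 = true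
        · rw [if_pos (by simpa using hpa), if_pos (by simpa using hpa)]
          simp [hc, ih]
        · rw [if_neg (by simpa using hpa), if_neg (by simpa using hpa), ih]

theorem filter_map_upd_neg (items : List (Int × List String)) (c : Int) (v : List String)
    (p : Int → Bool) (hp : p c = false) :
    (items.map (fun q => if q.1 = c then (c, v) else q)).filter (fun q => p q.1)
      = items.filter (fun q => p q.1) := by
  induction items with
  | nil => rfl
  | cons a t ih =>
      by_cases hc : a.1 = c
      · simp only [List.map_cons, if_pos hc, List.filter_cons]
        rw [if_neg (by simp [hp]), if_neg (by simp [hc, hp]), ih]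
      · simp only [List.map_cons, if_neg hc, List.filter_cons]
        by_cases hpa : p a.1 = true
        · rw [if_pos (by simpa using hpa), if_pos (by simpa using hpa), ih]
        · rw [if_neg (by simpa using hpa), if_neg (by simpa using hpa), ih]

theorem modify_filter_pos (d : PySem.Dict Int (List String)) (c : Int)
    (f : List String → List String) (p : Int → Bool) (hp : p c = true) :
    ((PySem.Dict.mk (d.items.filter (fun q => p q.1))).modify c [] f).items
      = (d.modify c [] f).items.filter (fun q => p q.1) := by
  cases d with
  | mk items =>
    simp only [PySem.Dict.modify, PySem.Dict.insert, PySem.Dict.contains,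
      PySem.Dict.getD, PySem.Dict.get?]
    simp only [beq_iff_eq] at *
    rw [any_filter_key items c p hp, find?_filter_key items c p hp]
    cases hany : items.any (fun q => q.1 == c) with
    | true =>
        simp only [if_true]
        rw [filter_map_upd items c _ p hp]
    | false =>
        simp only [Bool.false_eq_true, if_false]
        rw [List.filter_append, List.filter_cons]
        simp [hp]

theorem modify_filter_neg (d : PySem.Dict Int (List String)) (c : Int)
    (f : List String → List String) (p : Int → Bool) (hp : p c = false) :
    (d.modify c [] f).items.filter (fun q => p q.1) = d.items.filter (fun q => p q.1) := by
  cases d with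
  | mk items =>
    simp only [PySem.Dict.modify, PySem.Dict.insert, PySem.Dict.contains,
      PySem.Dict.getD, PySem.Dict.get?]
    cases hany : items.any (fun q => q.1 == c) with
    | true =>
        simp only [if_true, beq_iff_eq]
        rw [filter_map_upd_neg items c _ p hp]
    | false =>
        simp only [Bool.false_eq_true, if_false]
        rw [List.filter_append, List.filter_cons]
        simp [hp]

-- main invariant: A's pair of dicts is the grouping dict, split by key == 0
theorem inv_fold (l : List (String × List (String × Int))) :
    ∀ g : PySem.Dict Int (List String),
    l.foldl aStep (PySem.Dict.mk (g.items.filter (fun q => !(q.1 == 0))),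
                   PySem.Dict.mk (g.items.filter (fun q => q.1 == 0)))
      = (PySem.Dict.mk ((l.foldl bStep g).items.filter (fun q => !(q.1 == 0))),
         PySem.Dict.mk ((l.foldl bStep g).items.filter (fun q => q.1 == 0))) := by
  induction l with
  | nil => intro g; rfl
  | cons p t ih =>
      intro g
      have hstepB : bStep g p
          = g.modify ((PySem.Dict.mk p.2).getD "count" 0) [] (fun v => v ++ [p.1]) := by
        simp only [bStep, bKey]
        exact setdefault_modify g _ _
      have hstepA :
          aStep (PySem.Dict.mk (g.items.filter (fun q => !(q.1 == 0))),
                 PySem.Dict.mk (g.items.filter (fun q => q.1 == 0))) p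
            = (PySem.Dict.mk ((bStep g p).items.filter (fun q => !(q.1 == 0))),
               PySem.Dict.mk ((bStep g p).items.filter (fun q => q.1 == 0))) := by
        rw [hstepB]
        by_cases h0 : (PySem.Dict.mk p.2).getD "count" 0 = 0
        · simp only [aStep, h0, if_true]
          rw [astep_eq_modify]
          rw [Prod.mk.injEq]
          constructor
          · exact congrArg PySem.Dict.mk
              (modify_filter_neg g 0 _ (fun k => !(k == 0)) (by simp)).symm
          · exact PySem.Dict.ext
              (modify_filter_pos g 0 _ (fun k => k == 0) (by simp))
        · simp only [aStep, h0, if_false]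
          rw [astep_eq_modify]
          rw [Prod.mk.injEq]
          constructor
          · exact PySem.Dict.ext
              (modify_filter_pos g _ _ (fun k => !(k == 0)) (by simp [h0]))
          · exact congrArg PySem.Dict.mk
              (modify_filter_neg g _ _ (fun k => k == 0) (by simp [h0])).symm
      calc (p :: t).foldl aStep (PySem.Dict.mk (g.items.filter (fun q => !(q.1 == 0))),
              PySem.Dict.mk (g.items.filter (fun q => q.1 == 0)))
          = t.foldl aStep (aStep (PySem.Dict.mk (g.items.filter (fun q => !(q.1 == 0))),
              PySem.Dict.mk (g.items.filter (fun q => q.1 == 0))) p) := rfl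
        _ = t.foldl aStep (PySem.Dict.mk ((bStep g p).items.filter (fun q => !(q.1 == 0))),
              PySem.Dict.mk ((bStep g p).items.filter (fun q => q.1 == 0))) := by rw [hstepA]
        _ = _ := ih (bStep g p)

-- items of a dict with distinct keys, read off from keys and getD
theorem items_eq_keys_map (d : PySem.Dict Int (List String)) (h : d.keys.Nodup) :
    d.items = d.keys.map (fun k => (k, d.getD k [])) := by
  simp only [PySem.Dict.keys] at *
  rw [List.map_map]
  symm
  calc d.items.map ((fun k => (k, d.getD k [])) ∘ (fun q => q.1))
      = d.items.map id := by
        apply List.map_congr_left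
        intro q hq
        have : d.getD q.1 [] = q.2 :=
          PySem.Dict.getD_of_mem_items d (by simpa using hq) (by simpa using h) []
        simp [this]
    _ = d.items := List.map_id d.items

-- the grouping dict's items are exactly B's (distinct count, group) pairs
theorem fold_b_items (img : List (String × List (String × Int))) :
    (img.foldl bStep PySem.Dict.empty).items
      = (PySem.List.dedup (img.map bKey)).map (fun c => (c, bGroup img c)) := by
  have h1 : img.foldl bStep PySem.Dict.empty
      = (img.map (fun p => (bKey p, p.1))).foldl
          (fun d q => d.modify q.1 [] (fun v => v ++ [q.2])) PySem.Dict.empty := by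
    rw [List.foldl_map]
    exact PySem.List.foldl_congr_mem img _ _ _ (fun d p _ => by
      simp only [bStep]; exact (setdefault_modify d _ _))
  have hkeys : ((img.map (fun p => (bKey p, p.1))).foldl
      (fun d q => d.modify q.1 [] (fun v => v ++ [q.2])) PySem.Dict.empty).keys
      = PySem.List.dedup (img.map bKey) := by
    rw [PySem.Dict.keys_foldl_modify_key (img.map (fun p => (bKey p, p.1))) (fun q => q.1) []
          (fun _ q => fun v => v ++ [q.2]) PySem.Dict.empty]
    rw [PySem.Dict.keys_empty, PySem.Set.update_nil_left, List.map_map]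
    rfl
  have hnd : ((img.map (fun p => (bKey p, p.1))).foldl
      (fun d q => d.modify q.1 [] (fun v => v ++ [q.2])) PySem.Dict.empty).keys.Nodup := by
    rw [hkeys]; exact PySem.List.nodup_dedup _
  have hget : ∀ c, ((img.map (fun p => (bKey p, p.1))).foldl
      (fun d q => d.modify q.1 [] (fun v => v ++ [q.2])) PySem.Dict.empty).getD c []
      = bGroup img c := by
    intro c
    rw [PySem.Dict.getD_foldl_modify_append]
    rw [List.filter_map, List.map_map]
    rfl
  rw [h1, items_eq_keys_map _ hnd, hkeys]
  apply List.map_congr_left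
  intro c _
  rw [hget c]

-- ===== VERDICT (by name: the statement is the Claim_ definition above) =====
theorem ids_for_each_count_spec : Claim_equal_ids_for_each_count := by
  intro img _ _
  unfold Spec_ids_for_each_count ids_for_each_count ids_for_each_count_alt
  show ((img.foldl aStep (PySem.Dict.empty, PySem.Dict.empty)).2.items,
        (img.foldl aStep (PySem.Dict.empty, PySem.Dict.empty)).1.items)
     = (((PySem.List.dedup (img.map bKey)).filter (fun c => c == 0)).map (fun c => (c, bGroup img c)),
        ((PySem.List.dedup (img.map bKey)).filter (fun c => !(c == 0))).map (fun c => (c, bGroup img c)))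
  have h := inv_fold img PySem.Dict.empty
  rw [show (PySem.Dict.mk (((PySem.Dict.empty : PySem.Dict Int (List String))).items.filter (fun q => !(q.1 == 0))),
           PySem.Dict.mk (((PySem.Dict.empty : PySem.Dict Int (List String))).items.filter (fun q => q.1 == 0)))
        = ((PySem.Dict.empty : PySem.Dict Int (List String)), (PySem.Dict.empty : PySem.Dict Int (List String))) from rfl] at h
  rw [h, fold_b_items]
  rw [List.filter_map, List.filter_map]
  rfl
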